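-- pv_equiv track=rewrite | github.com/alumi5566/python | Amazon/validPW.py | solution
-- ===== SOURCE A (Python) =====
-- import collections
--
-- def solution(password):
--     c = collections.defaultdict(int)
--     for p in password:
--         c[p] += 1
--     n = len(password)
--     total = 1
--     for v in c.values():
--         total+=v*(n-v)
--         n-=v
--     return total
-- ===== SOURCE B (Python) =====
-- import collections
--
-- def solution(password):
--     c = collections.Counter(password)
--     n = len(password)
--     s = sum(v * v for v in c.values())
--     return 1 + (n * n - s) // 2
-- ===== Notes on version B (the rewrite author's own statement) =====
-- stated objective: alternative
-- what changed: Replaces A's order-dependent accumulation (running remainder n decremented by each count, adding v*(n-v) per distinct character) with the symmetric closed form 1 + (n^2 - sum of squared counts) // 2 over the same character counts.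
import Mathlib
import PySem

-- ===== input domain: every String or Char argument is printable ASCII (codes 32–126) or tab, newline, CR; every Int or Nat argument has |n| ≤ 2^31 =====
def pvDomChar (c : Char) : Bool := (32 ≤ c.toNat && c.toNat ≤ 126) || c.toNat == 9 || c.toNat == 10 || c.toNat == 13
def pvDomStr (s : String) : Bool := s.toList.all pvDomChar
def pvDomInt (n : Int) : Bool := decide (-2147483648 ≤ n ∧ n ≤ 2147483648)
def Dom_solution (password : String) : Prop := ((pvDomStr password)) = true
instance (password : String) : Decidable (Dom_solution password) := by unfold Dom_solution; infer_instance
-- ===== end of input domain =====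

-- B replaces A's running-remainder accumulation with the symmetric closed form
-- 1 + (n^2 - Σ v^2) // 2 over the same character counts (objective: alternative).

-- ===== PORT A =====
def solution (password : String) : Int :=
  -- c = defaultdict(int); for p in password: c[p] += 1
  let c : PySem.Dict Char Int :=
    password.toList.foldl (fun d p => d.modify p 0 (· + 1)) PySem.Dict.empty
  -- n = len(password); total = 1; for v in c.values(): total += v*(n-v); n -= v
  let r : Int × Int :=
    (PySem.Dict.values c).foldl
      (fun (s : Int × Int) v => (s.1 + v * (s.2 - v), s.2 - v))
      (1, PySem.Str.len password)
  r.1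

-- ===== PORT B =====
def solution_alt (password : String) : Int :=
  let c : PySem.Dict Char Int := PySem.Dict.counter password.toList
  let n : Int := PySem.Str.len password
  let s : Int := ((PySem.Dict.values c).map (fun v => v * v)).sum
  1 + PySem.Int.floordiv (n * n - s) 2

-- ===== PRECONDITION & SPEC =====
def Spec_solution (password : String) (out : Int) : Prop := out = solution_alt password
instance (password : String) (out : Int) : Decidable (Spec_solution password out) := by unfold Spec_solution; infer_instance

-- ===== CLAIM (what is proved, stated in full; the proofs are below) =====
def Claim_equal_solution : Prop := ∀ (password : String), Dom_solution password → Spec_solution password (solution password)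

-- ===== LEMMAS AND PROOFS =====

-- A's loop over the counts: twice the running total is the closed form.
theorem pv_fold_lemma (vs : List Int) (t n : Int) :
    (vs.foldl (fun (s : Int × Int) v => (s.1 + v * (s.2 - v), s.2 - v)) (t, n)).1 * 2
      = t * 2 + n * n - (n - vs.sum) * (n - vs.sum) - (vs.map (fun v => v * v)).sum := by
  induction vs generalizing t n with
  | nil => simp
  | cons v vs ih =>
    simp only [List.foldl_cons, List.map_cons, List.sum_cons]
    linear_combination ih (t + v * (n - v)) (n - v)

-- the counts in the counter sum to the length of the counted list
theorem pv_sum_values_counter (xs : List Char) :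
    (PySem.Dict.values (PySem.Dict.counter xs)).sum = (xs.length : Int) := by
  have hv : PySem.Dict.values (PySem.Dict.counter xs)
      = (PySem.Set.ofList xs).map (fun k => (xs.count k : Int)) := by
    simp [PySem.Dict.values, PySem.Dict.items_counter, List.map_map, Function.comp]
  have hnd : (PySem.Set.ofList xs).Nodup := PySem.Set.nodup_ofList xs
  have hnat : ((PySem.Set.ofList xs).map (fun k => xs.count k)).sum = xs.length := by
    rw [← List.sum_toFinset (fun k => xs.count k) hnd]
    have hfe : (PySem.Set.ofList xs).toFinset = xs.toFinset := by
      ext a; simp [PySem.Set.mem_ofList]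
    rw [hfe]
    simpa using Multiset.toFinset_sum_count_eq (s := (xs : Multiset Char))
  rw [hv]
  calc ((PySem.Set.ofList xs).map (fun k => (xs.count k : Int))).sum
      = (((PySem.Set.ofList xs).map (fun k => xs.count k)).map (fun m : Nat => (m : Int))).sum := by
        simp [List.map_map, Function.comp_def]
    _ = (xs.length : Int) := by rw [← Nat.cast_list_sum, hnat]

-- ===== VERDICT (by name: the statement is the Claim_ definition above) =====
theorem solution_spec : Claim_equal_solution := by
  intro password _
  unfold Spec_solution
  have hc : password.toList.foldl (fun d p => d.modify p 0 (· + 1)) PySem.Dict.empty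
      = PySem.Dict.counter password.toList := (PySem.Dict.counter_eq_foldl _).symm
  have hn : PySem.Str.len password = (password.toList.length : Int) := by
    simp [PySem.Str.len_eq]
  simp only [solution, solution_alt, hc, hn]
  set vs := PySem.Dict.values (PySem.Dict.counter password.toList) with hvs
  have hS : vs.sum = (password.toList.length : Int) := pv_sum_values_counter _
  have h2 := pv_fold_lemma vs 1 ((password.toList.length : Int))
  rw [hS] at h2
  simp only [sub_self, mul_zero] at h2
  have hfd : PySem.Int.floordiv
      ((password.toList.length : Int) * (password.toList.length : Int)
        - (vs.map (fun v => v * v)).sum) 2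
      = (vs.foldl (fun (s : Int × Int) v => (s.1 + v * (s.2 - v), s.2 - v))
          (1, (password.toList.length : Int))).1 - 1 := by
    rw [PySem.Int.floordiv_eq_iff_of_pos (by norm_num)]
    omega
  rw [hfd]
  omega
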